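-- pv_equiv track=rewrite | github.com/dejosemario/rag-system | main.py | semantic_chunk_text
-- ===== SOURCE A (Python) =====
-- from typing import List
--
-- def semantic_chunk_text(text: str, chunk_length: int = 500) -> List[str]:
--     """Split text into semantic chunks"""
--     chunks = []
--     paragraphs = text.split("\n\n")
--
--     current_chunk = ""
--     for paragraph in paragraphs:
--         paragraph = paragraph.strip()
--         if not paragraph:
--             continue
--
--         if len(current_chunk) + len(paragraph) < chunk_length:
--             current_chunk += paragraph + "\n\n"
--         else:
--             if current_chunk:
--                 chunks.append(current_chunk.strip())
--
--             if len(paragraph) > chunk_length: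
--                 sentences = paragraph.replace("!", ".").replace("?", ".").split(".")
--                 temp_chunk = ""
--
--                 for sentence in sentences:
--                     sentence = sentence.strip()
--                     if not sentence:
--                         continue
--
--                     if len(temp_chunk) + len(sentence) < chunk_length:
--                         temp_chunk += sentence + ". "
--                     else:
--                         if temp_chunk:
--                             chunks.append(temp_chunk.strip())
--
--                         if len(sentence) > chunk_length:
--                             for i in range(0, len(sentence), chunk_length):
--                                 chunks.append(sentence[i : i + chunk_length])
--                             temp_chunk = ""
--                         else:
--                             temp_chunk = sentence + ". "
--
--                 if temp_chunk:
--                     chunks.append(temp_chunk.strip())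
--                 current_chunk = ""
--             else:
--                 current_chunk = paragraph + "\n\n"
--
--     if current_chunk:
--         chunks.append(current_chunk.strip())
--
--     return chunks
-- ===== SOURCE B (Python) =====
-- from typing import List
--
-- def semantic_chunk_text(text: str, chunk_length: int = 500) -> List[str]:
--     """Split text into semantic chunks: pre-clean the units, then emit one chunk
--     per outer step by scanning ahead for the maximal run of units that fits
--     (chunk-at-a-time), instead of pushing units one by one into a string
--     accumulator that is flushed and re-stripped."""
--
--     def clean(parts):
--         return [u for u in (p.strip() for p in parts) if u]
--
--     def pack(units, sep, close, subdivide):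
--         chunks, i = [], 0
--         while i < len(units):
--             u = units[i]
--             if len(u) > chunk_length:
--                 chunks.extend(subdivide(u))
--                 i += 1
--                 continue
--             size = len(u) + len(sep)
--             j = i + 1
--             while j < len(units) and size + len(units[j]) < chunk_length:
--                 size += len(units[j]) + len(sep)
--                 j += 1
--             chunks.append(sep.join(units[i:j]) + close)
--             i = j
--         return chunks
--
--     def slices(sentence):
--         return [sentence[k:k + chunk_length] for k in range(0, len(sentence), chunk_length)]
--
--     def split_paragraph(paragraph):
--         sentences = clean(paragraph.replace("!", ".").replace("?", ".").split("."))
--         return pack(sentences, ". ", ".", slices)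
--
--     return pack(clean(text.split("\n\n")), "\n\n", "", split_paragraph)
-- ===== Notes on version B (the rewrite author's own statement) =====
-- stated objective: alternative
-- what changed: B first cleans (strips and filters) the units in a separate pass and then emits one chunk per outer step by scanning ahead for the maximal run of units that fits and joining it once, instead of A's single unit-at-a-time pass over raw units that grows a string accumulator with separators and re-strips it at every flush, with the same loop duplicated at paragraph and sentence level.
-- outside the precondition, e.g. on semantic_chunk_text('ab', 0): A raises ValueError, B raises ValueError
import Mathlib
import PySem

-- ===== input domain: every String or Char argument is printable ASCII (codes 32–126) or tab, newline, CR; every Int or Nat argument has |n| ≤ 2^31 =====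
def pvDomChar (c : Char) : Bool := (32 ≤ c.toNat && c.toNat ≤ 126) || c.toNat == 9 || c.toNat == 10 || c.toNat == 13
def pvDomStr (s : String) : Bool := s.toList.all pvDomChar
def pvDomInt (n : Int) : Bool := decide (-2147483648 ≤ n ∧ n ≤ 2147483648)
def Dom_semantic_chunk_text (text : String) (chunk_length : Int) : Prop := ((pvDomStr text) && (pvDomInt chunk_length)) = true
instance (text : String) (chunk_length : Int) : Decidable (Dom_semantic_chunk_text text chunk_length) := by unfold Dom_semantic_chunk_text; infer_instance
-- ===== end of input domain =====

-- B pre-cleans the units and emits one chunk per outer step (maximal fitting run, joined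
-- once) instead of A's unit-at-a-time string accumulator (objective: alternative, same cost).

-- ===== PORT A =====
-- Python ''.split(sep) with the literal nonempty separators "\n\n"/"." is PySem.Str.split?,
-- which is `some` exactly when the separator is nonempty, hence the `.getD []` is never taken.
def semantic_chunk_text (text : String) (chunk_length : Int) : List String :=
  let paragraphs := (PySem.Str.split? text "\n\n").getD []
  let r := paragraphs.foldl (fun (st : List String × String) paragraph =>
    let p := PySem.Str.strip paragraph
    if p = "" then st
    else if PySem.Str.len st.2 + PySem.Str.len p < chunk_length then (st.1, st.2 ++ (p ++ "\n\n"))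
    else
      let chunks := if st.2 ≠ "" then st.1 ++ [PySem.Str.strip st.2] else st.1
      if PySem.Str.len p > chunk_length then
        let sentences := (PySem.Str.split? (PySem.Str.replace (PySem.Str.replace p "!" ".") "?" ".") ".").getD []
        let r2 := sentences.foldl (fun (st2 : List String × String) sentence =>
          let s := PySem.Str.strip sentence
          if s = "" then st2
          else if PySem.Str.len st2.2 + PySem.Str.len s < chunk_length then (st2.1, st2.2 ++ (s ++ ". "))
          else
            let chunks2 := if st2.2 ≠ "" then st2.1 ++ [PySem.Str.strip st2.2] else st2.1
            if PySem.Str.len s > chunk_length then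
              (chunks2 ++ (PySem.List.pyRange 0 (PySem.Str.len s) chunk_length).map
                  (fun i => PySem.Str.slice s (some i) (some (i + chunk_length))), "")
            else (chunks2, s ++ ". ")) (chunks, "")
        ((if r2.2 ≠ "" then r2.1 ++ [PySem.Str.strip r2.2] else r2.1), "")
      else (chunks, p ++ "\n\n")) ([], "")
  if r.2 ≠ "" then r.1 ++ [PySem.Str.strip r.2] else r.1

-- ===== PORT B =====
-- Source B's clean(): strip every part, keep the nonempty ones
def pvClean (parts : List String) : List String :=
  (parts.map PySem.Str.strip).filter (· ≠ "")

-- Source B's slices(): char slices of width chunk_length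
def pvSlices (chunk_length : Int) (s : String) : List String :=
  (PySem.List.pyRange 0 (PySem.Str.len s) chunk_length).map
    (fun i => PySem.Str.slice s (some i) (some (i + chunk_length)))

-- Source B's inner `j` scan: the maximal run of further units that still fits, plus the rest
def pvTakeGroup (cl : Int) (sep : String) (sz : Int) : List String → List String × List String
  | [] => ([], [])
  | u :: rest =>
    if sz + PySem.Str.len u < cl then
      let p := pvTakeGroup cl sep (sz + PySem.Str.len u + PySem.Str.len sep) rest
      (u :: p.1, p.2)
    else ([], u :: rest)

lemma pvTakeGroup_len (cl : Int) (sep : String) (sz : Int) (l : List String) :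
    (pvTakeGroup cl sep sz l).2.length ≤ l.length := by
  induction l generalizing sz with
  | nil => simp [pvTakeGroup]
  | cons u rest ih =>
    simp only [pvTakeGroup]
    split
    · exact le_trans (ih _) (by simp)
    · simp

-- Source B's pack(): one chunk per outer step (the while-loop over chunk starts, as recursion)
def pvPack (cl : Int) (sep close : String) (subdivide : String → List String) : List String → List String
  | [] => []
  | u :: rest =>
    if PySem.Str.len u > cl then subdivide u ++ pvPack cl sep close subdivide rest
    else
      let p := pvTakeGroup cl sep (PySem.Str.len u + PySem.Str.len sep) rest
      (PySem.Str.join sep (u :: p.1) ++ close) :: pvPack cl sep close subdivide p.2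
termination_by l => l.length
decreasing_by
  · simp
  · exact Nat.lt_succ_of_le (pvTakeGroup_len cl sep _ rest)

def semantic_chunk_text_alt (text : String) (chunk_length : Int) : List String :=
  pvPack chunk_length "\n\n" "" (fun p =>
      pvPack chunk_length ". " "." (pvSlices chunk_length)
        (pvClean ((PySem.Str.split? (PySem.Str.replace (PySem.Str.replace p "!" ".") "?" ".") ".").getD [])))
    (pvClean ((PySem.Str.split? text "\n\n").getD []))

-- ===== PRECONDITION & SPEC =====
-- Pre_ excludes exactly the inputs where Python A raises ValueError (range() with step 0):
-- chunk_length = 0 together with a text containing a character that is neither whitespace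
-- nor sentence punctuation (on such texts a nonempty sentence reaches range(0, len, 0)).
def Pre_semantic_chunk_text (text : String) (chunk_length : Int) : Prop :=
  chunk_length ≠ 0 ∨ text.toList.all (fun c => c ∈ [' ', '\t', '\n', '\r', '.', '!', '?']) = true
instance (text : String) (chunk_length : Int) : Decidable (Pre_semantic_chunk_text text chunk_length) := by unfold Pre_semantic_chunk_text; infer_instance
def pvWitness_semantic_chunk_text : String × Int := ("Hello world. How are you?\n\nFine!", 12)

def Spec_semantic_chunk_text (text : String) (chunk_length : Int) (out : List String) : Prop := out = semantic_chunk_text_alt text chunk_length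
instance (text : String) (chunk_length : Int) (out : List String) : Decidable (Spec_semantic_chunk_text text chunk_length out) := by unfold Spec_semantic_chunk_text; infer_instance

-- ===== CLAIM (what is proved, stated in full; the proofs are below) =====
def Claim_equal_semantic_chunk_text : Prop := ∀ (text : String) (chunk_length : Int), Dom_semantic_chunk_text text chunk_length → Pre_semantic_chunk_text text chunk_length → Spec_semantic_chunk_text text chunk_length (semantic_chunk_text text chunk_length)

-- ===== LEMMAS AND PROOFS =====

-- A's accumulator string for a pending group of units: each unit followed by the separator.
def pvCat (sep : String) : List String → String
  | [] => ""
  | u :: g => u ++ sep ++ pvCat sep g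

-- a stripped, nonempty unit: nonempty, and no whitespace at either end
def pvGoodS (u : String) : Prop :=
  u.toList ≠ [] ∧ (∀ c, u.toList.head? = some c → PySem.Chars.isspace c = false) ∧
    (∀ c, u.toList.getLast? = some c → PySem.Chars.isspace c = false)

-- generic shape of A's loops
def pvStepA (cl : Int) (sep : String) (long : List String → String → List String) :
    List String × String → String → List String × String :=
  fun st unit =>
    let u := PySem.Str.strip unit
    if u = "" then st
    else if PySem.Str.len st.2 + PySem.Str.len u < cl then (st.1, st.2 ++ (u ++ sep))
    else
      let chunks := if st.2 ≠ "" then st.1 ++ [PySem.Str.strip st.2] else st.1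
      if PySem.Str.len u > cl then (long chunks u, "")
      else (chunks, u ++ sep)

def pvFlushA (st : List String × String) : List String :=
  if st.2 ≠ "" then st.1 ++ [PySem.Str.strip st.2] else st.1

-- char-list version of pvCat
def pvCatL (sepL : List Char) : List (List Char) → List Char
  | [] => []
  | l :: ls => l ++ sepL ++ pvCatL sepL ls

lemma pvCat_toList (sep : String) (g : List String) :
    (pvCat sep g).toList = pvCatL sep.toList (g.map String.toList) := by
  induction g with
  | nil => rfl
  | cons u g ih => simp [pvCat, pvCatL, ih]

lemma pvCatL_append (sepL : List Char) (ls : List (List Char)) (l : List Char) :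
    pvCatL sepL (ls ++ [l]) = pvCatL sepL ls ++ (l ++ sepL) := by
  induction ls with
  | nil => simp [pvCatL]
  | cons a ls ih => simp [pvCatL, ih]

lemma pvCat_append (sep : String) (g : List String) (u : String) :
    pvCat sep (g ++ [u]) = pvCat sep g ++ (u ++ sep) := by
  apply String.toList_inj.mp
  simp [pvCat_toList, pvCatL_append]

lemma pvCat_len (sep : String) (g : List String) (u : String) :
    PySem.Str.len (pvCat sep (g ++ [u])) = PySem.Str.len (pvCat sep g) + PySem.Str.len u + PySem.Str.len sep := by
  rw [pvCat_append, PySem.Str.len_append, PySem.Str.len_append]; ring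

lemma pvCat_ne_empty (sep : String) (u : String) (g : List String) (hu : u.toList ≠ []) :
    pvCat sep (u :: g) ≠ "" := by
  intro h
  have h2 := congrArg String.toList h
  rw [pvCat_toList] at h2
  simp only [List.map_cons, pvCatL, String.toList_empty, List.append_assoc,
    List.append_eq_nil_iff] at h2
  exact hu h2.1

lemma pvLen_empty : PySem.Str.len "" = 0 := by simp [PySem.Str.len_eq]

-- dropWhile facts
lemma pvHead_dropWhile {p : Char → Bool} {l : List Char} {c : Char}
    (h : (l.dropWhile p).head? = some c) : p c = false := by
  induction l with
  | nil => simp [List.dropWhile] at h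
  | cons a l ih =>
    rw [List.dropWhile_cons] at h
    by_cases hp : p a = true
    · rw [if_pos hp] at h; exact ih h
    · rw [if_neg hp] at h
      simp at h
      subst h
      simpa using hp

lemma pvDropWhile_eq_self {p : Char → Bool} {l : List Char} {c : Char}
    (hh : l.head? = some c) (hc : p c = false) : l.dropWhile p = l := by
  cases l with
  | nil => rfl
  | cons a l => simp at hh; rw [List.dropWhile_cons, hh]; simp [hc]

-- lstrip / rstrip facts
lemma pvLstrip_of_head {l : List Char} {c : Char} (hh : l.head? = some c)
    (hc : PySem.Chars.isspace c = false) : PySem.Chars.lstrip l = l := by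
  simp only [PySem.Chars.lstrip]
  exact pvDropWhile_eq_self hh hc

lemma pvRstrip_of_last {l : List Char} {c : Char} (hh : l.getLast? = some c)
    (hc : PySem.Chars.isspace c = false) : PySem.Chars.rstrip l = l := by
  simp only [PySem.Chars.rstrip]
  rw [pvDropWhile_eq_self (by rwa [List.head?_reverse]) hc, List.reverse_reverse]

lemma pvRstrip_append_space {l : List Char} {c : Char} (hc : PySem.Chars.isspace c = true) :
    PySem.Chars.rstrip (l ++ [c]) = PySem.Chars.rstrip l := by
  simp only [PySem.Chars.rstrip]
  rw [List.reverse_append]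
  simp [hc]

lemma pvRstrip_prefix (l : List Char) : PySem.Chars.rstrip l <+: l := by
  simp only [PySem.Chars.rstrip]
  obtain ⟨t, ht⟩ := List.dropWhile_suffix (l := l.reverse) PySem.Chars.isspace
  refine ⟨t.reverse, ?_⟩
  have := congrArg List.reverse ht
  simpa using this

-- a nonempty strip result is a good unit
lemma pvGood_strip (s : String) (h : PySem.Str.strip s ≠ "") : pvGoodS (PySem.Str.strip s) := by
  have htl : (PySem.Str.strip s).toList = PySem.Chars.rstrip (PySem.Chars.lstrip s.toList) := by
    rw [PySem.Str.toList_strip]; rfl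
  have hne : (PySem.Str.strip s).toList ≠ [] := by
    intro hnil
    exact h (String.toList_inj.mp (by rw [hnil]; rfl))
  refine ⟨hne, ?_, ?_⟩
  · intro c hc
    rw [htl] at hc hne
    obtain ⟨t, ht⟩ := pvRstrip_prefix (PySem.Chars.lstrip s.toList)
    have hh : (PySem.Chars.lstrip s.toList).head? = some c := by
      rw [← ht, List.head?_append]
      cases hx : (PySem.Chars.rstrip (PySem.Chars.lstrip s.toList)).head? with
      | none => exact absurd (List.head?_eq_none_iff.mp hx) hne
      | some d =>
        rw [hx] at hc
        injection hc with hdc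
        subst hdc
        rfl
    exact pvHead_dropWhile (p := PySem.Chars.isspace) hh
  · intro c hc
    rw [htl] at hc
    simp only [PySem.Chars.rstrip] at hc
    rw [List.getLast?_reverse] at hc
    exact pvHead_dropWhile (p := PySem.Chars.isspace) hc

-- stripping a good unit is the identity
lemma pvStrip_of_good (u : String) (h : pvGoodS u) : PySem.Str.strip u = u := by
  obtain ⟨hne, hh, hl⟩ := h
  apply String.toList_inj.mp
  have htl : (PySem.Str.strip u).toList = PySem.Chars.rstrip (PySem.Chars.lstrip u.toList) := by
    rw [PySem.Str.toList_strip]; rfl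
  rw [htl]
  cases hc : u.toList.head? with
  | none => exact absurd (List.head?_eq_none_iff.mp hc) hne
  | some c =>
    rw [pvLstrip_of_head hc (hh c hc)]
    cases hd : u.toList.getLast? with
    | none => exact absurd (List.getLast?_eq_none_iff.mp hd) hne
    | some d => exact pvRstrip_of_last hd (hl d hd)

lemma pvStrip_strip (s : String) : PySem.Str.strip (PySem.Str.strip s) = PySem.Str.strip s := by
  by_cases h : PySem.Str.strip s = ""
  · rw [h]; decide
  · exact pvStrip_of_good _ (pvGood_strip s h)

-- A's loop over the raw units equals A's loop over the cleaned units
lemma pvFold_clean (cl : Int) (sep : String) (longA : List String → String → List String)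
    (us : List String) : ∀ st,
    us.foldl (pvStepA cl sep longA) st = (pvClean us).foldl (pvStepA cl sep longA) st := by
  induction us with
  | nil => intro st; rfl
  | cons x r ih =>
    intro st
    have hcl : pvClean (x :: r) =
        if PySem.Str.strip x = "" then pvClean r else PySem.Str.strip x :: pvClean r := by
      by_cases hx : PySem.Str.strip x = "" <;>
        simp [pvClean, List.map_cons, hx]
    rw [List.foldl_cons, hcl]
    by_cases hx : PySem.Str.strip x = ""
    · have hst : pvStepA cl sep longA st x = st := by
        unfold pvStepA; simp [hx]
      rw [hst, if_pos hx]
      exact ih st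
    · have hst : pvStepA cl sep longA st x = pvStepA cl sep longA st (PySem.Str.strip x) := by
        unfold pvStepA; rw [pvStrip_strip]
      rw [if_neg hx, List.foldl_cons, hst]
      exact ih _

-- every element of a cleaned list is a good unit
lemma pvClean_good (us : List String) : ∀ u ∈ pvClean us, pvGoodS u := by
  intro u hu
  simp only [pvClean, List.mem_filter, List.mem_map] at hu
  obtain ⟨⟨x, _, rfl⟩, hne⟩ := hu
  exact pvGood_strip x (by simpa using hne)

-- last character of a join of good units is not whitespace
lemma pvJoin_last (sepL : List Char) (ls : List (List Char)) (hne : ls ≠ [])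
    (hg : ∀ l ∈ ls, l ≠ [] ∧ (∀ c, l.getLast? = some c → PySem.Chars.isspace c = false)) :
    ∃ c, (PySem.Chars.join sepL ls).getLast? = some c ∧ PySem.Chars.isspace c = false := by
  induction ls with
  | nil => exact absurd rfl hne
  | cons a ls ih =>
    cases ls with
    | nil =>
      rw [PySem.Chars.join_singleton]
      obtain ⟨ha, hlast⟩ := hg a (by simp)
      cases hc : a.getLast? with
      | none => exact absurd (List.getLast?_eq_none_iff.mp hc) ha
      | some c => exact ⟨c, rfl, hlast c hc⟩
    | cons b ls' =>
      rw [PySem.Chars.join_cons_cons]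
      obtain ⟨c, hc, hcs⟩ := ih (by simp) (fun l hl => hg l (List.mem_cons_of_mem _ hl))
      refine ⟨c, ?_, hcs⟩
      rw [List.append_assoc, List.getLast?_append]
      rw [List.getLast?_append, hc]
      rfl

lemma pvCatL_eq_join (sepL : List Char) (ls : List (List Char)) (hne : ls ≠ []) :
    pvCatL sepL ls = PySem.Chars.join sepL ls ++ sepL := by
  induction ls with
  | nil => exact absurd rfl hne
  | cons a ls ih =>
    cases ls with
    | nil => simp [pvCatL, PySem.Chars.join_singleton]
    | cons b ls' =>
      rw [PySem.Chars.join_cons_cons,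
        show pvCatL sepL (a :: b :: ls') = a ++ sepL ++ pvCatL sepL (b :: ls') from rfl,
        ih (by simp)]
      simp

lemma pvJoin_ne_nil (sepL : List Char) (a : List Char) (ls : List (List Char)) (ha : a ≠ []) :
    PySem.Chars.join sepL (a :: ls) ≠ [] := by
  cases ls with
  | nil => rwa [PySem.Chars.join_singleton]
  | cons b ls' => rw [PySem.Chars.join_cons_cons]; simp [ha]

-- the flush-string lemma, generic in (sep, close) given a fact about rstrip past the separator
lemma pvStrip_cat (sep close : String)
    (hsep : ∀ x : List Char, x ≠ [] → (∀ c, x.getLast? = some c → PySem.Chars.isspace c = false) →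
      PySem.Chars.rstrip (x ++ sep.toList) = x ++ close.toList)
    (g : List String) (hne : g ≠ []) (hg : ∀ u ∈ g, pvGoodS u) :
    PySem.Str.strip (pvCat sep g) = PySem.Str.join sep g ++ close := by
  apply String.toList_inj.mp
  rw [PySem.Str.toList_strip, pvCat_toList, String.toList_append, PySem.Str.toList_join]
  obtain ⟨u0, g0, rfl⟩ := List.exists_cons_of_ne_nil hne
  rw [List.map_cons]
  have hgl : ∀ l ∈ u0.toList :: g0.map String.toList,
      l ≠ [] ∧ (∀ c, l.getLast? = some c → PySem.Chars.isspace c = false) := by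
    intro l hl
    rcases List.mem_cons.mp hl with h | h
    · subst h; exact ⟨(hg u0 (by simp)).1, (hg u0 (by simp)).2.2⟩
    · obtain ⟨u, hu, rfl⟩ := List.mem_map.mp h
      exact ⟨(hg u (by simp [hu])).1, (hg u (by simp [hu])).2.2⟩
  rw [pvCatL_eq_join sep.toList _ (by simp)]
  have hjoin_ne : PySem.Chars.join sep.toList (u0.toList :: g0.map String.toList) ≠ [] :=
    pvJoin_ne_nil _ _ _ (hgl u0.toList (by simp)).1
  have hhead : ∀ c, (PySem.Chars.join sep.toList (u0.toList :: g0.map String.toList)).head? = some c →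
      PySem.Chars.isspace c = false := by
    have hahead : ∀ c, u0.toList.head? = some c → PySem.Chars.isspace c = false :=
      (hg u0 (by simp)).2.1
    intro c hc
    cases hx2 : g0.map String.toList with
    | nil => rw [hx2, PySem.Chars.join_singleton] at hc; exact hahead c hc
    | cons b ls'' =>
      rw [hx2, PySem.Chars.join_cons_cons] at hc
      apply hahead c
      rw [List.append_assoc, List.head?_append] at hc
      cases hx : u0.toList.head? with
      | none => exact absurd (List.head?_eq_none_iff.mp hx) (hgl u0.toList (by simp)).1
      | some d =>
        rw [hx] at hc
        injection hc with hdc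
        subst hdc
        rfl
  obtain ⟨cl', hcl, hcls⟩ := pvJoin_last sep.toList _ (by simp) hgl
  simp only [PySem.Chars.strip]
  have hhead2 : ∀ c, (PySem.Chars.join sep.toList (u0.toList :: g0.map String.toList) ++ sep.toList).head? = some c →
      PySem.Chars.isspace c = false := by
    intro c hc
    rw [List.head?_append] at hc
    apply hhead c
    cases hx : (PySem.Chars.join sep.toList (u0.toList :: g0.map String.toList)).head? with
    | none => exact absurd (List.head?_eq_none_iff.mp hx) hjoin_ne
    | some d =>
      rw [hx] at hc
      injection hc with hdc
      subst hdc
      rfl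
  cases hx : (PySem.Chars.join sep.toList (u0.toList :: g0.map String.toList) ++ sep.toList).head? with
  | none =>
    rw [List.head?_eq_none_iff, List.append_eq_nil_iff] at hx
    exact absurd hx.1 hjoin_ne
  | some c =>
    rw [pvLstrip_of_head hx (hhead2 c hx)]
    exact hsep _ hjoin_ne (fun c hc => by rw [hcl] at hc; injection hc with h; subst h; exact hcls)

-- the two concrete (sep, close) instances
lemma pvSepFact_par : ∀ x : List Char, x ≠ [] →
    (∀ c, x.getLast? = some c → PySem.Chars.isspace c = false) →
    PySem.Chars.rstrip (x ++ ("\n\n" : String).toList) = x ++ ("" : String).toList := by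
  intro x hx hlast
  have h1 : ("\n\n" : String).toList = ['\n', '\n'] := by decide
  rw [h1, show x ++ ['\n', '\n'] = (x ++ ['\n']) ++ ['\n'] by simp]
  rw [pvRstrip_append_space (by decide), pvRstrip_append_space (by decide)]
  cases hc : x.getLast? with
  | none => exact absurd (List.getLast?_eq_none_iff.mp hc) hx
  | some c =>
    rw [pvRstrip_of_last hc (hlast c hc)]
    simp

lemma pvSepFact_sent : ∀ x : List Char, x ≠ [] →
    (∀ c, x.getLast? = some c → PySem.Chars.isspace c = false) →
    PySem.Chars.rstrip (x ++ (". " : String).toList) = x ++ ("." : String).toList := by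
  intro x hx _
  have h1 : (". " : String).toList = ['.', ' '] := by decide
  rw [h1, show x ++ ['.', ' '] = (x ++ ['.']) ++ [' '] by simp]
  rw [pvRstrip_append_space (by decide)]
  rw [pvRstrip_of_last (l := x ++ ['.']) (c := '.') (by simp) (by decide),
    show ("." : String).toList = ['.'] by decide]

-- THE MAIN SIMULATION: A's unit-at-a-time loop with pending group g equals
-- B's chunk-at-a-time pvPack (the pending group is first completed by pvTakeGroup).
lemma pvMain (cl : Int) (sep close : String) (longA : List String → String → List String)
    (sub : String → List String)
    (Hflush : ∀ g, g ≠ [] → (∀ u ∈ g, pvGoodS u) →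
      PySem.Str.strip (pvCat sep g) = PySem.Str.join sep g ++ close)
    (Hlong : ∀ cs u, longA cs u = cs ++ sub u)
    (us : List String) : ∀ (hus : ∀ u ∈ us, pvGoodS u) (chunks g : List String),
    (∀ u ∈ g, pvGoodS u) →
    pvFlushA (us.foldl (pvStepA cl sep longA) (chunks, pvCat sep g)) =
      chunks ++ (if g = [] then pvPack cl sep close sub us
        else
          let p := pvTakeGroup cl sep (PySem.Str.len (pvCat sep g)) us
          (PySem.Str.join sep (g ++ p.1) ++ close) :: pvPack cl sep close sub p.2) := by
  induction us with
  | nil =>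
    intro _ chunks g hg
    simp only [List.foldl_nil]
    cases g with
    | nil => simp [pvFlushA, pvCat, pvPack]
    | cons a g' =>
      have hne : pvCat sep (a :: g') ≠ "" := pvCat_ne_empty sep a g' (hg a (by simp)).1
      unfold pvFlushA
      simp only [ne_eq, hne, not_false_eq_true]
      rw [Hflush (a :: g') (by simp) hg]
      simp [pvTakeGroup, pvPack]
  | cons unit us ih =>
    intro hus chunks g hg
    have hu : pvGoodS unit := hus unit (by simp)
    have hus' : ∀ u ∈ us, pvGoodS u := fun u h => hus u (by simp [h])
    simp only [List.foldl_cons]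
    have hstep : pvStepA cl sep longA (chunks, pvCat sep g) unit =
        (let u := unit;
         if PySem.Str.len (pvCat sep g) + PySem.Str.len u < cl then (chunks, pvCat sep g ++ (u ++ sep))
         else
           let cs := if pvCat sep g ≠ "" then chunks ++ [PySem.Str.strip (pvCat sep g)] else chunks
           if PySem.Str.len u > cl then (longA cs u, "")
           else (cs, u ++ sep)) := by
      unfold pvStepA
      rw [pvStrip_of_good unit hu]
      simp only [if_neg (show ¬ unit = "" from fun h => hu.1 (by rw [h]; rfl))]
    rw [hstep]
    simp only []
    by_cases h2 : PySem.Str.len (pvCat sep g) + PySem.Str.len unit < cl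
    · rw [if_pos h2]
      have hc : pvCat sep g ++ (unit ++ sep) = pvCat sep (g ++ [unit]) := (pvCat_append sep g unit).symm
      rw [hc]
      have hg' : ∀ u ∈ g ++ [unit], pvGoodS u := by
        intro u hmem
        rcases List.mem_append.mp hmem with h | h
        · exact hg u h
        · simp at h; subst h; exact hu
      rw [ih hus' chunks (g ++ [unit]) hg']
      cases g with
      | nil =>
        -- A starts a fresh group with `unit`; so does pvPack (len unit < cl here)
        have hlt : PySem.Str.len unit < cl := by
          have := h2; rw [show pvCat sep ([] : List String) = "" from rfl, pvLen_empty] at this; omega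
        rw [if_neg (show ¬([] ++ [unit] : List String) = [] by simp), if_pos rfl]
        show _ = chunks ++ pvPack cl sep close sub (unit :: us)
        rw [show pvPack cl sep close sub (unit :: us) =
            if PySem.Str.len unit > cl then sub unit ++ pvPack cl sep close sub us
            else
              let p := pvTakeGroup cl sep (PySem.Str.len unit + PySem.Str.len sep) us
              (PySem.Str.join sep (unit :: p.1) ++ close) :: pvPack cl sep close sub p.2
          from by rw [pvPack]]
        rw [if_neg (by omega)]
        have hlen : PySem.Str.len (pvCat sep ([] ++ [unit])) = PySem.Str.len unit + PySem.Str.len sep := by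
          rw [pvCat_len]
          rw [show pvCat sep ([] : List String) = "" from rfl, pvLen_empty]; ring
        rw [hlen]
        simp
      | cons a g' =>
        rw [if_neg (by simp), if_neg (by simp)]
        have hlen : PySem.Str.len (pvCat sep ((a :: g') ++ [unit])) =
            PySem.Str.len (pvCat sep (a :: g')) + PySem.Str.len unit + PySem.Str.len sep :=
          pvCat_len sep (a :: g') unit
        rw [hlen]
        rw [show pvTakeGroup cl sep (PySem.Str.len (pvCat sep (a :: g'))) (unit :: us) =
            if PySem.Str.len (pvCat sep (a :: g')) + PySem.Str.len unit < cl then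
              let p := pvTakeGroup cl sep (PySem.Str.len (pvCat sep (a :: g')) + PySem.Str.len unit + PySem.Str.len sep) us
              (unit :: p.1, p.2)
            else ([], unit :: us)
          from by rw [pvTakeGroup]]
        rw [if_pos h2]
        simp
    · rw [if_neg h2]
      -- A flushes: the flushed chunk (when g ≠ []) is B's joined group
      have hcs : (if pvCat sep g ≠ "" then chunks ++ [PySem.Str.strip (pvCat sep g)] else chunks)
          = (if g = [] then chunks else chunks ++ [PySem.Str.join sep g ++ close]) := by
        cases g with
        | nil => simp [pvCat]
        | cons a g' =>
          have hne : pvCat sep (a :: g') ≠ "" := pvCat_ne_empty sep a g' (hg a (by simp)).1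
          rw [if_pos hne, if_neg (by simp), Hflush (a :: g') (by simp) hg]
      rw [hcs]
      have htg : g ≠ [] → pvTakeGroup cl sep (PySem.Str.len (pvCat sep g)) (unit :: us) = ([], unit :: us) := by
        intro _
        rw [pvTakeGroup, if_neg h2]
      by_cases h4 : PySem.Str.len unit > cl
      · rw [if_pos h4, Hlong]
        have h00 : ("" : String) = pvCat sep [] := rfl
        have h0' : pvFlushA (us.foldl (pvStepA cl sep longA)
              ((if g = [] then chunks else chunks ++ [PySem.Str.join sep g ++ close]) ++ sub unit, pvCat sep [])) =
            ((if g = [] then chunks else chunks ++ [PySem.Str.join sep g ++ close]) ++ sub unit) ++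
              pvPack cl sep close sub us := by
          rw [ih hus' _ [] (by intro u hu; simp at hu)]
          simp
        rw [h00, h0']
        cases g with
        | nil =>
          rw [if_pos rfl, if_pos rfl]
          rw [show pvPack cl sep close sub (unit :: us) =
              if PySem.Str.len unit > cl then sub unit ++ pvPack cl sep close sub us
              else
                let p := pvTakeGroup cl sep (PySem.Str.len unit + PySem.Str.len sep) us
                (PySem.Str.join sep (unit :: p.1) ++ close) :: pvPack cl sep close sub p.2
            from by rw [pvPack]]
          rw [if_pos h4]
          simp
        | cons a g' =>
          rw [if_neg (by simp), if_neg (by simp), htg (by simp)]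
          rw [show pvPack cl sep close sub (unit :: us) =
              if PySem.Str.len unit > cl then sub unit ++ pvPack cl sep close sub us
              else
                let p := pvTakeGroup cl sep (PySem.Str.len unit + PySem.Str.len sep) us
                (PySem.Str.join sep (unit :: p.1) ++ close) :: pvPack cl sep close sub p.2
            from by rw [pvPack]]
          rw [if_pos h4]
          simp
      · rw [if_neg h4]
        have hc1 : (unit ++ sep : String) = pvCat sep [unit] := by
          apply String.toList_inj.mp; simp [pvCat]
        rw [hc1, ih hus' _ [unit] (by intro v hv; simp at hv; subst hv; exact hu)]
        have hlen1 : PySem.Str.len (pvCat sep [unit]) = PySem.Str.len unit + PySem.Str.len sep := by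
          rw [← hc1, PySem.Str.len_append]
        rw [if_neg (show ¬([unit] : List String) = [] by simp), hlen1]
        cases g with
        | nil =>
          rw [if_pos rfl, if_pos rfl]
          rw [show pvPack cl sep close sub (unit :: us) =
              if PySem.Str.len unit > cl then sub unit ++ pvPack cl sep close sub us
              else
                let p := pvTakeGroup cl sep (PySem.Str.len unit + PySem.Str.len sep) us
                (PySem.Str.join sep (unit :: p.1) ++ close) :: pvPack cl sep close sub p.2
            from by rw [pvPack]]
          rw [if_neg h4]
          simp
        | cons a g' =>
          rw [if_neg (by simp), if_neg (by simp), htg (by simp)]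
          rw [show pvPack cl sep close sub (unit :: us) =
              if PySem.Str.len unit > cl then sub unit ++ pvPack cl sep close sub us
              else
                let p := pvTakeGroup cl sep (PySem.Str.len unit + PySem.Str.len sep) us
                (PySem.Str.join sep (unit :: p.1) ++ close) :: pvPack cl sep close sub p.2
            from by rw [pvPack]]
          rw [if_neg h4]
          simp

-- A's port written in the generic shape (definitional)
lemma pvA_eq (text : String) (cl : Int) :
    semantic_chunk_text text cl =
      pvFlushA (((PySem.Str.split? text "\n\n").getD []).foldl
        (pvStepA cl "\n\n" (fun cs p =>
          pvFlushA ((((PySem.Str.split? (PySem.Str.replace (PySem.Str.replace p "!" ".") "?" ".") ".").getD []).foldl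
            (pvStepA cl ". " (fun cs2 s => cs2 ++ pvSlices cl s)) (cs, "")))))
        ([], "")) := rfl

-- the inner (sentence-level) long handler of A equals "emitted chunks ++ B's sentence chunking"
lemma pvLong_outer (cl : Int) (cs : List String) (p : String) :
    pvFlushA ((((PySem.Str.split? (PySem.Str.replace (PySem.Str.replace p "!" ".") "?" ".") ".").getD []).foldl
        (pvStepA cl ". " (fun cs2 s => cs2 ++ pvSlices cl s)) (cs, "")))
    = cs ++ pvPack cl ". " "." (pvSlices cl)
        (pvClean ((PySem.Str.split? (PySem.Str.replace (PySem.Str.replace p "!" ".") "?" ".") ".").getD [])) := by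
  set raw := (PySem.Str.split? (PySem.Str.replace (PySem.Str.replace p "!" ".") "?" ".") ".").getD []
  rw [pvFold_clean]
  have h0 : ("" : String) = pvCat ". " [] := rfl
  rw [show ((cs, "") : List String × String) = (cs, pvCat ". " []) from by rw [← h0]]
  rw [pvMain cl ". " "." (fun cs2 s => cs2 ++ pvSlices cl s) (pvSlices cl)
    (fun g hne hg => pvStrip_cat ". " "." pvSepFact_sent g hne hg)
    (fun _ _ => rfl) (pvClean raw) (pvClean_good raw) cs [] (by intro u hu; simp at hu)]
  rw [if_pos rfl]

theorem pv_equal (text : String) (cl : Int) :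
    semantic_chunk_text text cl = semantic_chunk_text_alt text cl := by
  rw [pvA_eq]
  rw [pvFold_clean]
  have h0 : ("" : String) = pvCat "\n\n" [] := rfl
  rw [show (([], "") : List String × String) = (([] : List String), pvCat "\n\n" []) from by rw [← h0]]
  rw [pvMain cl "\n\n" "" (fun cs p =>
      pvFlushA ((((PySem.Str.split? (PySem.Str.replace (PySem.Str.replace p "!" ".") "?" ".") ".").getD []).foldl
        (pvStepA cl ". " (fun cs2 s => cs2 ++ pvSlices cl s)) (cs, ""))))
    (fun p => pvPack cl ". " "." (pvSlices cl)
        (pvClean ((PySem.Str.split? (PySem.Str.replace (PySem.Str.replace p "!" ".") "?" ".") ".").getD [])))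
    (fun g hne hg => pvStrip_cat "\n\n" "" pvSepFact_par g hne hg)
    (fun cs p => pvLong_outer cl cs p)
    (pvClean ((PySem.Str.split? text "\n\n").getD []))
    (pvClean_good _) [] [] (by intro u hu; simp at hu)]
  rw [if_pos rfl]
  rfl

-- ===== VERDICT (by name: the statement is the Claim_ definition above) =====
theorem semantic_chunk_text_spec : Claim_equal_semantic_chunk_text := by
  intro text cl _ _
  unfold Spec_semantic_chunk_text
  exact pv_equal text cl
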